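-- pv_equiv track=rewrite | github.com/Balagopal-datascientist/basic_algorithms | problems/prantha.py | complete_prantha
-- ===== SOURCE A (Python) =====
-- def complete_prantha(string):
--     counter=0
--     for i in string:
--         if i =='(':
--             counter+=1
--         else:
--             counter-=1
--     return abs(counter)
-- ===== SOURCE B (Python) =====
-- def complete_prantha(string):
--     def bal(lo, hi):
--         if hi - lo == 0:
--             return 0
--         if hi - lo == 1:
--             return 1 if string[lo] == '(' else -1
--         mid = (lo + hi) // 2
--         return bal(lo, mid) + bal(mid, hi)
--     return abs(bal(0, len(string)))
-- ===== Notes on version B (the rewrite author's own statement) =====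
-- stated objective: alternative
-- what changed: Replaces A's left-to-right loop with a running counter by a recursive divide-and-conquer: the balance of a string is computed by splitting the index range in half, recursing on each half and summing, correct because the +1/-1 balance is additive over concatenation.
import Mathlib
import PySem

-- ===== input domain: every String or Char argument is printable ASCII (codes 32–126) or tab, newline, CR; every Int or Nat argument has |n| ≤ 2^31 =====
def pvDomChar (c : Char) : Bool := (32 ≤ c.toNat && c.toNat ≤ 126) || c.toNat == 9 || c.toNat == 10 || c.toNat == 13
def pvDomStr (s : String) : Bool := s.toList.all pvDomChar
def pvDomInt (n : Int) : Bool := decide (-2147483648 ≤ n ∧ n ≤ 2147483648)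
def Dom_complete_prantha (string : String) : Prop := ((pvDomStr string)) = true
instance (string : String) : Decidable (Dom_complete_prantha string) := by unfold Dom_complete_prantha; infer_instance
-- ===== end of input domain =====

-- B replaces A's single left-to-right loop with a running counter by a recursive
-- divide-and-conquer (balance of a string = balance of left half + balance of right half);
-- objective: alternative decomposition, same cost.

-- ===== PORT A =====
def complete_prantha (string : String) : Int :=
  let counter : Int := string.toList.foldl (fun counter i => if i = '(' then counter + 1 else counter - 1) 0
  |counter|

-- ===== PORT B =====
-- Source B's bal(lo, hi) recurses on the half-open index range [lo, hi) of the string,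
-- splitting at mid = (lo+hi)//2; ported as structural recursion on the character
-- sublist (the range's content), splitting at length/2 — the same split point,
-- since (lo+hi)//2 - lo = (hi-lo)//2.
def pvBal : List Char → Int
  | [] => 0
  | [c] => if c = '(' then 1 else -1
  | a :: b :: t =>
    let mid := (a :: b :: t).length / 2
    pvBal ((a :: b :: t).take mid) + pvBal ((a :: b :: t).drop mid)
termination_by l => l.length
decreasing_by
  · simp [List.length_take]; omega
  · simp [List.length_drop]; omega

def complete_prantha_alt (string : String) : Int :=
  |pvBal string.toList|

-- ===== PRECONDITION & SPEC =====
def Spec_complete_prantha (string : String) (out : Int) : Prop := out = complete_prantha_alt string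
instance (string : String) (out : Int) : Decidable (Spec_complete_prantha string out) := by unfold Spec_complete_prantha; infer_instance

-- ===== CLAIM (what is proved, stated in full; the proofs are below) =====
def Claim_equal_complete_prantha : Prop := ∀ (string : String), Dom_complete_prantha string → Spec_complete_prantha string (complete_prantha string)

-- ===== LEMMAS AND PROOFS =====
-- both sides equal the closed form 2*count '(' - length
theorem pvSplit_closed (l : List Char) (n : Nat) :
    (2 * ((l.take n).count '(' : Int) - (l.take n).length)
      + (2 * ((l.drop n).count '(' : Int) - (l.drop n).length)
      = 2 * (l.count '(' : Int) - l.length := by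
  have hc : (l.take n).count '(' + (l.drop n).count '(' = l.count '(' := by
    rw [← List.count_append, List.take_append_drop]
  have hl : (l.take n).length + (l.drop n).length = l.length := by
    rw [← List.length_append, List.take_append_drop]
  push_cast [← hc, ← hl]
  ring

theorem pvBal_closed (l : List Char) :
    pvBal l = 2 * (l.count '(' : Int) - l.length := by
  fun_induction pvBal l with
  | case1 => simp
  | case2 => simp
  | case3 c hc => simp [hc]
  | case4 a b t mid ih1 ih2 =>
    rw [ih1, ih2]
    exact pvSplit_closed _ _

theorem foldl_balance (l : List Char) (a : Int) :
    l.foldl (fun counter i => if i = '(' then counter + 1 else counter - 1) a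
      = a + 2 * (l.count '(' : Int) - l.length := by
  induction l generalizing a with
  | nil => simp
  | cons x t ih =>
    by_cases hx : x = '('
    · subst hx; simp [List.foldl_cons, ih]; ring
    · simp [List.foldl_cons, hx, ih]; ring

-- ===== VERDICT (by name: the statement is the Claim_ definition above) =====
theorem complete_prantha_spec : Claim_equal_complete_prantha := by
  intro s _
  unfold Spec_complete_prantha complete_prantha complete_prantha_alt
  rw [foldl_balance, pvBal_closed]
  simp
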